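-- pv_equiv track=rewrite | github.com/cnerg/trailmap | trailmap/pathway_analysis.py | find_paths_containing_all
-- ===== SOURCE A (Python) =====
-- def find_paths_containing_all(pathways, facilities):
--     '''returns a subset of pathways that contain all facilities in input list
--     '''
--     if len(pathways) is 0:
--         return set()
--
--     # convert to list if user passed a string or int
--     if type(facilities) == int or type(facilities) == str:
--         facilities = [facilities]
--
--     # if user passed an empty list, return no pathways
--     if not facilities:
--         return set()
--
--     p = set([path for path in pathways if set(facilities).issubset(path)])
--
--     return p
-- ===== SOURCE B (Python) =====
-- def find_paths_containing_all(pathways, facilities):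
--     '''returns a subset of pathways that contain all facilities in input list
--     '''
--     if len(pathways) == 0:
--         return set()
--
--     # convert to list if user passed a string or int
--     if type(facilities) == int or type(facilities) == str:
--         facilities = [facilities]
--
--     # if user passed an empty list, return no pathways
--     if not facilities:
--         return set()
--
--     # inverted index: facility -> set of paths that contain it
--     index = {}
--     for path in pathways:
--         pathset = set(path)
--         for fac in facilities:
--             if fac in pathset:
--                 index.setdefault(fac, set()).add(path)
--
--     # intersect the per-facility path sets
--     result = index.get(facilities[0], set())
--     for fac in facilities[1:]:
--         result = result & index.get(fac, set())
--     return result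
-- ===== Notes on version B (the rewrite author's own statement) =====
-- stated objective: alternative
-- what changed: Replaces A's per-pathway subset test with an inverted index built in one pass (facility -> set of paths containing it) whose per-facility path sets are then intersected.
import Mathlib
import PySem

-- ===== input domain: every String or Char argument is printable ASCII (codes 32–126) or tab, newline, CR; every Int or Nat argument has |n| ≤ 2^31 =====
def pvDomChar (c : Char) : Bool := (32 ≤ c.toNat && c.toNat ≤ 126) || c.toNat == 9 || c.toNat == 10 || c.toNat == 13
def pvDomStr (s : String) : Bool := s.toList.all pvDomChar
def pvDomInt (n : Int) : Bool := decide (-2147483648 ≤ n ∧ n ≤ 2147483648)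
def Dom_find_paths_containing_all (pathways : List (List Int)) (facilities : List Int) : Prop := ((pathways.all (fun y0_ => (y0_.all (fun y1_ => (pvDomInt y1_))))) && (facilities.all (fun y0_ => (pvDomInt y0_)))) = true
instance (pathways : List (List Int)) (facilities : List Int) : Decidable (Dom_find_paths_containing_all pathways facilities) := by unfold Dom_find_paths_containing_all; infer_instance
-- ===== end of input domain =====

-- B replaces A's per-pathway subset test by an inverted index (facility → set of paths)
-- built in one pass and then intersected across the facilities (objective: alternative).

-- ===== PORT A =====
-- the 'type(facilities) == int or type(facilities) == str' guard can never fire on the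
-- typed input (facilities : List Int), so it is omitted
def find_paths_containing_all (pathways : List (List Int)) (facilities : List Int) : List (List Int) :=
  if pathways.length = 0 then PySem.Set.empty
  else if facilities.isEmpty then PySem.Set.empty
  else PySem.Set.ofList (pathways.filter (fun path => PySem.Set.issubset (PySem.Set.ofList facilities) path))

-- ===== PORT B =====
-- index.setdefault(fac, set()).add(path) for each path / fac with fac in set(path)
def pvIndex (pathways : List (List Int)) (facilities : List Int) : PySem.Dict Int (PySem.Set (List Int)) :=
  pathways.foldl (fun idx path =>
    let pathset := PySem.Set.ofList path
    facilities.foldl (fun d fac =>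
      if pathset.contains fac then d.insert fac (PySem.Set.add (d.getD fac PySem.Set.empty) path) else d)
      idx)
    PySem.Dict.empty

def find_paths_containing_all_alt (pathways : List (List Int)) (facilities : List Int) : List (List Int) :=
  if pathways.length = 0 then PySem.Set.empty
  else
    match facilities with
    | [] => PySem.Set.empty
    | f0 :: rest =>
      let idx := pvIndex pathways (f0 :: rest)
      rest.foldl (fun r fac => PySem.Set.inter r (idx.getD fac PySem.Set.empty))
        (idx.getD f0 PySem.Set.empty)

-- ===== PRECONDITION & SPEC =====
def Spec_find_paths_containing_all (pathways : List (List Int)) (facilities : List Int) (out : List (List Int)) : Prop := out = find_paths_containing_all_alt pathways facilities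
instance (pathways : List (List Int)) (facilities : List Int) (out : List (List Int)) : Decidable (Spec_find_paths_containing_all pathways facilities out) := by unfold Spec_find_paths_containing_all; infer_instance

-- ===== CLAIM (what is proved, stated in full; the proofs are below) =====
def Claim_equal_find_paths_containing_all : Prop := ∀ (pathways : List (List Int)) (facilities : List Int), Dom_find_paths_containing_all pathways facilities → Spec_find_paths_containing_all pathways facilities (find_paths_containing_all pathways facilities)

-- ===== LEMMAS AND PROOFS =====

-- one path's inner loop, read through getD
theorem pv_inner_getD (path : List Int) (facs : List Int)
    (idx : PySem.Dict Int (PySem.Set (List Int))) (k : Int) :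
    (facs.foldl (fun d fac =>
        if path.contains fac then d.insert fac (PySem.Set.add (d.getD fac PySem.Set.empty) path) else d)
      idx).getD k PySem.Set.empty =
    (if k ∈ facs ∧ path.contains k = true
      then PySem.Set.add (idx.getD k PySem.Set.empty) path
      else idx.getD k PySem.Set.empty) := by
  induction facs generalizing idx with
  | nil => simp
  | cons f fs ih =>
    simp only [List.foldl_cons, ih]
    by_cases hk : k = f
    · subst hk
      by_cases hc : path.contains k = true <;>
        by_cases hfs : k ∈ fs <;>
          simp_all [PySem.Dict.getD_insert_self]
    · by_cases hc : path.contains f = true <;>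
        simp_all [PySem.Dict.getD_insert]

-- the built index, read through getD at a facility
theorem pv_build_getD (pathways : List (List Int)) (facs : List Int) (k : Int)
    (hk : k ∈ facs) (idx : PySem.Dict Int (PySem.Set (List Int))) :
    (pathways.foldl (fun idx path =>
        facs.foldl (fun d fac =>
          if path.contains fac then d.insert fac (PySem.Set.add (d.getD fac PySem.Set.empty) path) else d)
          idx) idx).getD k PySem.Set.empty =
    (pathways.filter (fun p => p.contains k)).foldl PySem.Set.add (idx.getD k PySem.Set.empty) := by
  induction pathways generalizing idx with
  | nil => simp
  | cons p ps ih =>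
    simp only [List.foldl_cons, List.filter_cons]
    by_cases hc : p.contains k = true
    · simp only [hc, List.foldl_cons, ih, pv_inner_getD, hk, and_self, if_pos]
    · have hc' : ¬ k ∈ p := by simpa using hc
      simp only [hc]
      simp only [ih, pv_inner_getD]
      simp [hk, hc']

theorem pv_contains_ofList (p : List Int) (f : Int) :
    (PySem.Set.ofList p).contains f = p.contains f := by
  rw [Bool.eq_iff_iff]; simp [PySem.Set.mem_ofList]

theorem pv_index_spec (pathways : List (List Int)) (facs : List Int) (k : Int) (hk : k ∈ facs) :
    (pvIndex pathways facs).getD k PySem.Set.empty =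
    PySem.Set.ofList (pathways.filter (fun p => p.contains k)) := by
  unfold pvIndex
  simp only [pv_contains_ofList]
  rw [pv_build_getD pathways facs k hk]
  simp [PySem.Dict.getD_empty, PySem.Set.ofList_eq_foldl]

theorem pv_filter_add (q : List Int → Bool) (s : PySem.Set (List Int)) (x : List Int) :
    List.filter q (PySem.Set.add s x) =
    (if q x then PySem.Set.add (List.filter q s) x else List.filter q s) := by
  simp only [PySem.Set.add_eq_ite]
  by_cases hx : x ∈ s
  · by_cases hq : q x = true
    · simp [hx, hq, List.mem_filter.mpr ⟨hx, hq⟩]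
    · simp [hx, hq]
  · by_cases hq : q x = true
    · have : x ∉ List.filter q s := fun h => hx (List.mem_filter.mp h).1
      simp [hx, hq, List.filter_append, this]
    · simp [hx, hq, List.filter_append]

theorem pv_filter_ofList (q : List Int → Bool) (xs : List (List Int)) :
    List.filter q (PySem.Set.ofList xs) = PySem.Set.ofList (List.filter q xs) := by
  induction xs using List.reverseRecOn with
  | nil => simp
  | append_singleton ys y ih =>
    rw [PySem.Set.ofList_append_singleton, pv_filter_add, List.filter_append]
    by_cases hq : q y = true
    · simp [hq, ih, PySem.Set.ofList_append_singleton]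
    · simp [hq, ih]

-- the intersection fold computed on ofList-filter sets
theorem pv_fold_inter (pathways : List (List Int)) (rest : List Int) (q : List Int → Bool)
    (g : Int → PySem.Set (List Int))
    (hg : ∀ k ∈ rest, g k = PySem.Set.ofList (pathways.filter (fun p => p.contains k))) :
    rest.foldl (fun r fac => PySem.Set.inter r (g fac))
      (PySem.Set.ofList (pathways.filter q)) =
    PySem.Set.ofList (pathways.filter (fun p => q p && rest.all (fun k => p.contains k))) := by
  induction rest generalizing q with
  | nil => simp
  | cons f fs ih =>
    simp only [List.foldl_cons]
    have hstep : PySem.Set.inter (PySem.Set.ofList (pathways.filter q)) (g f) =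
        PySem.Set.ofList (pathways.filter (fun p => q p && p.contains f)) := by
      show List.filter _ _ = _
      rw [pv_filter_ofList]
      congr 1
      rw [List.filter_filter]
      apply List.filter_congr
      intro p hp
      rw [hg f (by simp), Bool.eq_iff_iff]
      simp [PySem.Set.mem_ofList, List.mem_filter, hp, and_comm]
    rw [hstep, ih _ (fun k hk => hg k (by simp [hk]))]
    congr 1
    apply List.filter_congr
    intro p _
    simp [Bool.and_assoc]

-- ===== VERDICT (by name: the statement is the Claim_ definition above) =====
theorem find_paths_containing_all_spec : Claim_equal_find_paths_containing_all := by
  intro pathways facilities _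
  show find_paths_containing_all pathways facilities = find_paths_containing_all_alt pathways facilities
  unfold find_paths_containing_all find_paths_containing_all_alt
  by_cases hp : pathways.length = 0
  · simp [hp]
  · simp only [hp, if_false]
    match facilities with
    | [] => simp
    | f0 :: rest =>
      simp only [List.isEmpty_cons, Bool.false_eq_true, if_false]
      rw [pv_index_spec pathways (f0 :: rest) f0 (by simp)]
      rw [pv_fold_inter pathways rest (fun p => p.contains f0)
        (fun fac => (pvIndex pathways (f0 :: rest)).getD fac PySem.Set.empty)
        (fun k hk => pv_index_spec pathways (f0 :: rest) k (by simp [hk]))]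
      congr 1
      apply List.filter_congr
      intro p _
      rw [Bool.eq_iff_iff]
      simp only [PySem.Set.issubset_iff, PySem.Set.mem_ofList, Bool.and_eq_true, List.all_eq_true,
        List.contains_iff_mem]
      constructor
      · intro h; exact ⟨h f0 (by simp), fun k hk => h k (by simp [hk])⟩
      · intro h x hx; rcases List.mem_cons.mp hx with rfl | hx
        · exact h.1
        · exact h.2 x hx
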